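-- pv_equiv track=rewrite | github.com/Pawandadra/2048_Game | main.py | check_loss
-- ===== SOURCE A (Python) =====
-- def check_loss(grid):
--     if any(0 in row for row in grid):
--         return False
--     for i in range(4):
--         for j in range(4):
--             if (j < 3 and grid[i][j] == grid[i][j + 1]) or (i < 3 and grid[i][j] == grid[i + 1][j]):
--                 return False
--     return True
-- ===== SOURCE B (Python) =====
-- def _runs(line):
--     """Number of maximal runs of equal values (run-length-encoding length)."""
--     n = 0
--     prev = object()
--     for x in line:
--         if x != prev:
--             n += 1
--             prev = x
--     return n
--
-- def check_loss(grid):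
--     if any(0 in row for row in grid):
--         return False
--     lines = [[grid[i][j] for j in range(4)] for i in range(4)] \
--           + [[grid[i][j] for i in range(4)] for j in range(4)]
--     return all(_runs(line) == 4 for line in lines)
-- ===== Notes on version B (the rewrite author's own statement) =====
-- stated objective: alternative
-- what changed: B tests run-length incompressibility: it builds the board's four rows and four columns as lines and declares loss iff every line has 4 maximal runs of equal values (a run counter with a previous-value accumulator), instead of A's nested index loop testing each neighbour pair with j<3/i<3 guards.
-- outside the precondition, e.g. on check_loss([[1, 1]]): A returns False, B raises IndexError
import Mathlib
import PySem

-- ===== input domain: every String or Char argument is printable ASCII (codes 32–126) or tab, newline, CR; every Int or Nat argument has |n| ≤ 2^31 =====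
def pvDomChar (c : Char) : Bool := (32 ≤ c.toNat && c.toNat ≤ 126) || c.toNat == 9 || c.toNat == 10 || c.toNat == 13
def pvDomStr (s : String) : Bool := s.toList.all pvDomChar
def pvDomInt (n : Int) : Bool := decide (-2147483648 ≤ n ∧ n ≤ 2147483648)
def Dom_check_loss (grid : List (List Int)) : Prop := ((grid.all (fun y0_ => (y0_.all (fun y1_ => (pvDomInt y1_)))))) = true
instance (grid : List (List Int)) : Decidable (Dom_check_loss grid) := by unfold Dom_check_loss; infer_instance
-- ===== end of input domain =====

-- B replaces A's nested index loop (j<3/i<3 guards testing each neighbour pair) by a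
-- run-length incompressibility test: each of the board's 4 rows and 4 columns must have 4
-- maximal runs of equal values (alternative decomposition, same cost).


-- ===== PORT A =====
-- grid[i][j] (none = IndexError, excluded by Pre_)
def clAGet (grid : List (List Int)) (i j : Int) : Option Int :=
  (PySem.List.pyGet? grid i).bind (fun row => PySem.List.pyGet? row j)

def check_loss (grid : List (List Int)) : Bool :=
  if grid.any (fun row => decide ((0:Int) ∈ row)) then false
  else
    !((PySem.List.pyRange 0 4 1).any (fun i =>
        (PySem.List.pyRange 0 4 1).any (fun j =>
          (decide (j < 3) && (clAGet grid i j == clAGet grid i (j + 1))) ||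
          (decide (i < 3) && (clAGet grid i j == clAGet grid (i + 1) j)))))

-- ===== PORT B =====
-- _runs: number of maximal runs of equal values (prev = object() sentinel → Option.none)
def clRuns (line : List Int) : Nat :=
  (line.foldl (fun (st : Nat × Option Int) x =>
      if some x ≠ st.2 then (st.1 + 1, some x) else st) (0, none)).1

-- grid[i][j] for 0 ≤ i,j < 4: pyGetD defaults are never used inside Pre_ (indices in range),
-- so this is exact there; outside Pre_ the Python raises IndexError and nothing is claimed
def clBGet (grid : List (List Int)) (i j : Int) : Int :=
  PySem.List.pyGetD (PySem.List.pyGetD grid i []) j 0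

def check_loss_alt (grid : List (List Int)) : Bool :=
  if grid.any (fun row => decide ((0:Int) ∈ row)) then false
  else
    let lines :=
      (PySem.List.pyRange 0 4 1).map (fun i =>
        (PySem.List.pyRange 0 4 1).map (fun j => clBGet grid i j)) ++
      (PySem.List.pyRange 0 4 1).map (fun j =>
        (PySem.List.pyRange 0 4 1).map (fun i => clBGet grid i j))
    lines.all (fun line => clRuns line == 4)

-- ===== PRECONDITION & SPEC =====
-- Pre_ excludes zero-free grids whose leading 4x4 region is incomplete: there A indexes
-- outside the grid and either raises IndexError or accidentally returns False early
-- (B's own indexing raises IndexError on those grids).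
def Pre_check_loss (grid : List (List Int)) : Prop :=
  (∃ row ∈ grid, (0:Int) ∈ row) ∨ (4 ≤ grid.length ∧ ∀ row ∈ grid.take 4, 4 ≤ row.length)
instance (grid : List (List Int)) : Decidable (Pre_check_loss grid) := by
  unfold Pre_check_loss; infer_instance

def pvWitness_check_loss : List (List Int) :=
  [[2, 4, 2, 4], [4, 2, 4, 2], [2, 4, 2, 4], [4, 2, 4, 2]]

def Spec_check_loss (grid : List (List Int)) (out : Bool) : Prop := out = check_loss_alt grid
instance (grid : List (List Int)) (out : Bool) : Decidable (Spec_check_loss grid out) := by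
  unfold Spec_check_loss; infer_instance

-- ===== CLAIM (what is proved, stated in full; the proofs are below) =====
def Claim_equal_check_loss : Prop :=
  ∀ (grid : List (List Int)), Dom_check_loss grid → Pre_check_loss grid →
    Spec_check_loss grid (check_loss grid)

-- ===== LEMMAS AND PROOFS =====
theorem pg0 {α : Type} (a b c d : α) (t : List α) : PySem.List.pyGet? (a::b::c::d::t) 0 = some a := by simp [pysem]
theorem pg1 {α : Type} (a b c d : α) (t : List α) : PySem.List.pyGet? (a::b::c::d::t) 1 = some b := by simp [pysem]
theorem pg2 {α : Type} (a b c d : α) (t : List α) : PySem.List.pyGet? (a::b::c::d::t) 2 = some c := by simp [pysem]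
theorem pg3 {α : Type} (a b c d : α) (t : List α) : PySem.List.pyGet? (a::b::c::d::t) 3 = some d := by simp [pysem]
theorem pd0 {α : Type} (a b c d e : α) (t : List α) : PySem.List.pyGetD (a::b::c::d::t) 0 e = a := by simp [pysem]
theorem pd1 {α : Type} (a b c d e : α) (t : List α) : PySem.List.pyGetD (a::b::c::d::t) 1 e = b := by simp [pysem]
theorem pd2 {α : Type} (a b c d e : α) (t : List α) : PySem.List.pyGetD (a::b::c::d::t) 2 e = c := by simp [pysem]
theorem pd3 {α : Type} (a b c d e : α) (t : List α) : PySem.List.pyGetD (a::b::c::d::t) 3 e = d := by simp [pysem]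

theorem runs4 (a b c d : Int) :
    (clRuns [a, b, c, d] == 4) = (!(a == b) && !(b == c) && !(c == d)) := by
  by_cases h1 : b = a <;> by_cases h2 : c = b <;> by_cases h3 : d = c <;>
    simp [clRuns, h1, h2, h3] <;> (try split_ifs) <;> (try simp_all) <;> (try tauto)

theorem exists_four_cons {α : Type} (l : List α) (h : 4 ≤ l.length) :
    ∃ a b c d t, l = a :: b :: c :: d :: t := by
  match l with
  | a :: b :: c :: d :: t => exact ⟨a, b, c, d, t, rfl⟩
  | [] | [_] | [_, _] | [_, _, _] => simp at h

-- ===== VERDICT (by name: the statement is the Claim_ definition above) =====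
set_option maxHeartbeats 2000000 in
theorem check_loss_spec : Claim_equal_check_loss := by
  intro grid _ hpre
  unfold Spec_check_loss check_loss check_loss_alt
  by_cases hz : grid.any (fun row => decide ((0:Int) ∈ row))
  · simp [hz]
  · simp only [hz]
    rcases hpre with hzero | ⟨hlen, hrows⟩
    · exfalso
      obtain ⟨row, hr, h0⟩ := hzero
      exact hz (by simp only [List.any_eq_true]; exact ⟨row, hr, by simpa using h0⟩)
    · obtain ⟨r0, r1, r2, r3, rest, rfl⟩ := exists_four_cons grid hlen
      obtain ⟨a0, b0, c0, d0, t0, rfl⟩ := exists_four_cons r0 (hrows _ (by simp))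
      obtain ⟨a1, b1, c1, d1, t1, rfl⟩ := exists_four_cons r1 (hrows _ (by simp))
      obtain ⟨a2, b2, c2, d2, t2, rfl⟩ := exists_four_cons r2 (hrows _ (by simp))
      obtain ⟨a3, b3, c3, d3, t3, rfl⟩ := exists_four_cons r3 (hrows _ (by simp))
      have hr4 : PySem.List.pyRange 0 4 1 = [0, 1, 2, 3] := by decide
      rw [hr4]
      simp only [show (0:Int) + 1 = 1 by decide, show (1:Int) + 1 = 2 by decide,
        show (2:Int) + 1 = 3 by decide, show (3:Int) + 1 = 4 by decide,
        clAGet, clBGet, List.any_cons, List.any_nil, pg0, pg1, pg2, pg3, Option.bind_some,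
        pd0, pd1, pd2, pd3, List.map_cons, List.map_nil,
        List.all_cons, List.all_nil, List.cons_append, List.nil_append, runs4,
        show decide ((0:Int) < 3) = true from rfl, show decide ((1:Int) < 3) = true from rfl,
        show decide ((2:Int) < 3) = true from rfl, show decide ((3:Int) < 3) = false from rfl,
        Bool.false_and, Bool.or_false, Bool.false_or, Bool.true_and]
      apply Bool.eq_iff_iff.mpr
      simp only [Bool.false_eq_true, if_false, Bool.not_eq_eq_eq_not, Bool.not_true,
        Bool.and_eq_true, Bool.not_eq_true', Bool.or_eq_false_iff,
        beq_eq_false_iff_ne, ne_eq, Option.some.injEq]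
      constructor
      · intro h; tauto
      · intro h; tauto
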